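-- pv_equiv track=rewrite | github.com/MingXu-123/CMU-15112-HW | 15112-CMU/week3/test6.py | findRowOfCanvas
-- ===== SOURCE A (Python) =====
-- def makeUpString(text):
--     lines = text.split("\n")
--     maxLenOfLine = len(max(lines, key=len))
--     result = ""
--     for line in lines:
--         blanks = maxLenOfLine - len(line)
--         result += (line + blanks * " " + "\n")
--     result = result[:-1]
--     result = "".join(result)
--     return result
--
-- def findRowOfCanvas(text):
--     text = makeUpString(text)
--     height = 0
--     for c in text:
--         if c == "\n":
--             height += 1
--     height += 1
--     return height
-- ===== SOURCE B (Python) =====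
-- def findRowOfCanvas(text):
--     return len(text.split("\n"))
-- ===== Notes on version B (the rewrite author's own statement) =====
-- stated objective: simpler
-- what changed: B drops the whole makeUpString padding/rebuilding step and the character-by-character newline scan, returning the length of the split line list directly, which equals A's padded-string newline count plus one.
import Mathlib
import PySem

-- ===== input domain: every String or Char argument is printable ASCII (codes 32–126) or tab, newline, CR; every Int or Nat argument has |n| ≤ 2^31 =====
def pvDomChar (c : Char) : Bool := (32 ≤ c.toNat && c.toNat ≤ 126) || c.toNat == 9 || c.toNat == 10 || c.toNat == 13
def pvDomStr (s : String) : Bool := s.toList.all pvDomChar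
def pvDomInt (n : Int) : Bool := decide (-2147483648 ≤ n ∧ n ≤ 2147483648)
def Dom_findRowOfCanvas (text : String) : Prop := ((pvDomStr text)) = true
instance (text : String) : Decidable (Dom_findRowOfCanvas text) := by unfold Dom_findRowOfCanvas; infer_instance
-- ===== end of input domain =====

-- B replaces A's pad-then-rescan construction by returning the number of split lines directly;
-- objective: simpler (the padding never changes the newline count).

-- ===== PORT A =====
-- helper: makeUpString — pad every line of `text` to the longest line's length, re-join with '\n'.
-- Python's max(lines, key=len) raises on []; split never returns [], so the `[]` default is unreachable.
def makeUpStringA (text : String) : String :=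
  let lines := PySem.Chars.splitOn text.toList ['\n']
  let maxLenOfLine : Int := (PySem.List.maxD lines (fun l => (l.length : Int)) []).length
  let result := lines.foldl
    (fun r line =>
      r ++ (line ++ PySem.List.pyRepeat [' '] (maxLenOfLine - (line.length : Int)) ++ ['\n']))
    ([] : List Char)
  let result := PySem.List.slice result none (some (-1))   -- result[:-1]
  String.ofList result                                     -- "".join of a string is the string itself

def findRowOfCanvas (text : String) : Int :=
  let text := makeUpStringA text
  let height : Int := text.toList.foldl (fun h c => if c == '\n' then h + 1 else h) 0
  height + 1

-- ===== PORT B =====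
def findRowOfCanvas_alt (text : String) : Int :=
  ((PySem.Chars.splitOn text.toList ['\n']).length : Int)

-- ===== PRECONDITION & SPEC =====
def Spec_findRowOfCanvas (text : String) (out : Int) : Prop := out = findRowOfCanvas_alt text
instance (text : String) (out : Int) : Decidable (Spec_findRowOfCanvas text out) := by unfold Spec_findRowOfCanvas; infer_instance

-- ===== CLAIM (what is proved, stated in full; the proofs are below) =====
def Claim_equal_findRowOfCanvas : Prop := ∀ (text : String), Dom_findRowOfCanvas text → Spec_findRowOfCanvas text (findRowOfCanvas text)

-- ===== LEMMAS AND PROOFS =====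

-- A clean structural recursion equal to PySem.Chars.splitOn's fuelled `go` for a one-char separator.
def splitNl (nl : Char) : List Char → List Char → List (List Char)
  | [], cur => [cur.reverse]
  | c :: rest, cur => if c = nl then cur.reverse :: splitNl nl rest [] else splitNl nl rest (c :: cur)

theorem splitOn_go_eq (nl : Char) (fuel : Nat) (l cur : List Char) (acc : List (List Char))
    (h : l.length < fuel) :
    PySem.Chars.splitOn.go [nl] fuel l cur acc = acc.reverse ++ splitNl nl l cur := by
  induction fuel generalizing l cur acc with
  | zero => omega
  | succ fuel ih =>
    cases l with
    | nil => simp [PySem.Chars.splitOn.go, splitNl]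
    | cons c rest =>
      simp only [PySem.Chars.splitOn.go, List.isPrefixOf, splitNl]
      by_cases hc : c = nl
      · simp only [hc, BEq.rfl, Bool.true_and]
        rw [ih _ _ _ (by simpa using Nat.lt_of_succ_lt_succ h)]
        simp
      · have hb : (nl == c) = false := by
          simp only [beq_eq_false_iff_ne]
          exact fun h' => hc h'.symm
        simp only [hb, Bool.false_and, Bool.false_eq_true, if_false, if_neg hc]
        exact ih _ _ _ (by simpa using Nat.lt_of_succ_lt_succ h)

theorem splitOn_eq_splitNl (nl : Char) (cs : List Char) :
    PySem.Chars.splitOn cs [nl] = splitNl nl cs [] := by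
  unfold PySem.Chars.splitOn
  rw [splitOn_go_eq nl (cs.length + 1) cs [] [] (by omega)]
  simp

theorem splitNl_no_nl (nl : Char) (l cur : List Char) (hcur : nl ∉ cur) :
    ∀ p ∈ splitNl nl l cur, nl ∉ p := by
  induction l generalizing cur with
  | nil =>
    intro p hp
    simp [splitNl] at hp
    simpa [hp] using hcur
  | cons c rest ih =>
    intro p hp
    by_cases hc : c = nl
    · simp [splitNl, hc] at hp
      rcases hp with hp | hp
      · simpa [hp] using hcur
      · exact ih [] (by simp) p hp
    · simp [splitNl, hc] at hp
      refine ih (c :: cur) ?_ p hp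
      simp only [List.mem_cons, not_or]
      exact ⟨fun h' => hc h'.symm, hcur⟩

theorem splitNl_ne_nil (nl : Char) (l cur : List Char) : splitNl nl l cur ≠ [] := by
  cases l with
  | nil => simp [splitNl]
  | cons c rest =>
    by_cases hc : c = nl <;> simp [splitNl, hc]
    exact splitNl_ne_nil nl rest (c :: cur)

-- the per-line block A appends: line ++ padding ++ '\n'
def blockA (m : Int) (line : List Char) : List Char :=
  line ++ PySem.List.pyRepeat [' '] (m - (line.length : Int)) ++ ['\n']

theorem count_nl_blockA (m : Int) (line : List Char) (h : '\n' ∉ line) :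
    (blockA m line).count '\n' = 1 := by
  simp [blockA, PySem.List.pyRepeat_singleton, List.count_append, List.count_replicate,
    List.count_eq_zero_of_not_mem h]

theorem foldl_blockA (lines : List (List Char)) (m : Int) (init : List Char) :
    lines.foldl (fun r line => r ++ blockA m line) init
      = init ++ (lines.map (blockA m)).flatten := by
  induction lines generalizing init with
  | nil => simp
  | cons a t ih => simp [ih, List.append_assoc]

theorem count_nl_flatten (lines : List (List Char)) (m : Int)
    (h : ∀ p ∈ lines, '\n' ∉ p) :
    ((lines.map (blockA m)).flatten).count '\n' = lines.length := by
  induction lines with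
  | nil => simp
  | cons a t ih =>
    simp only [List.map_cons, List.flatten_cons, List.count_append]
    rw [count_nl_blockA m a (h a (by simp)), ih (fun p hp => h p (by simp [hp]))]
    simp [Nat.add_comm]

-- dropping the final '\n' of the flattened blocks removes exactly one newline
theorem count_nl_dropLast (lines : List (List Char)) (m : Int)
    (hne : lines ≠ []) (h : ∀ p ∈ lines, '\n' ∉ p) :
    ((lines.map (blockA m)).flatten).dropLast.count '\n' = lines.length - 1 := by
  rcases List.eq_nil_or_concat lines with rfl | ⟨ls, last, rfl⟩
  · exact (hne rfl).elim
  · have : ((ls.concat last).map (blockA m)).flatten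
        = ((ls.map (blockA m)).flatten ++ (last ++ PySem.List.pyRepeat [' '] (m - (last.length : Int)))) ++ ['\n'] := by
      simp [blockA, List.append_assoc]
    rw [this, List.dropLast_concat]
    have hlast : '\n' ∉ last := h last (by simp)
    simp only [List.count_append]
    rw [count_nl_flatten ls m (fun p hp => h p (by simp [hp]))]
    simp [PySem.List.pyRepeat_singleton, List.count_replicate, List.count_eq_zero_of_not_mem hlast]

-- ===== VERDICT (by name: the statement is the Claim_ definition above) =====
theorem findRowOfCanvas_spec : Claim_equal_findRowOfCanvas := by
  intro text _
  unfold Spec_findRowOfCanvas findRowOfCanvas findRowOfCanvas_alt makeUpStringA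
  simp only [splitOn_eq_splitNl]
  set lines := splitNl '\n' text.toList [] with hl
  set m : Int := ((PySem.List.maxD lines (fun l => (l.length : Int)) []).length : Int) with hm
  have hno : ∀ p ∈ lines, '\n' ∉ p := splitNl_no_nl '\n' text.toList [] (by simp)
  have hne : lines ≠ [] := splitNl_ne_nil '\n' text.toList []
  have hfold : lines.foldl
      (fun r line => r ++ (line ++ PySem.List.pyRepeat [' '] (m - (line.length : Int)) ++ ['\n']))
      ([] : List Char) = (lines.map (blockA m)).flatten := by
    simpa [blockA] using foldl_blockA lines m []
  rw [hfold, PySem.List.slice_to_neg_one, String.toList_ofList,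
    PySem.List.foldl_beq_add_one, count_nl_dropLast lines m hne hno]
  have : 1 ≤ lines.length := List.length_pos_of_ne_nil hne
  push_cast [Nat.cast_sub this]
  ring
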